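-- pv_equiv track=rewrite | github.com/dipanshu-765/ATM | Binchar.py | char_to_binary
-- ===== SOURCE A (Python) =====
-- def char_to_binary(a):
--     char_ascii = ord(a)
--     div = []
--     result = ''
--     for i in range(8):
--         temp = char_ascii % 2
--         div.append(temp)
--         char_ascii = int(char_ascii / 2)
--     for i in div[::-1]:
--         result += str(i)
--     return result
-- ===== SOURCE B (Python) =====
-- def char_to_binary(a):
--     return format(ord(a), '08b')
-- ===== Notes on version B (the rewrite author's own statement) =====
-- stated objective: idiomatic
-- what changed: Replaced the manual 8-step divide-and-modulo bit-extraction loop plus reverse-and-concatenate pass with a single built-in format call producing the zero-padded 8-bit binary string directly.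
import Mathlib
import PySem

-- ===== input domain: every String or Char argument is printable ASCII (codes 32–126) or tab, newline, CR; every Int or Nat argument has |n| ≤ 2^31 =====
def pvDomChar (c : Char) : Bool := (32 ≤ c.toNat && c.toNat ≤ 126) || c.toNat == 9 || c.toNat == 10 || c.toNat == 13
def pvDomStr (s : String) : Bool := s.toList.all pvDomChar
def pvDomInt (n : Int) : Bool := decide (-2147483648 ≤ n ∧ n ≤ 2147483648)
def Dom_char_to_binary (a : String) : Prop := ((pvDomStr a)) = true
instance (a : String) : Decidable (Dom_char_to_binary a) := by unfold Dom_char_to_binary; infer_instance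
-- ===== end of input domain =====

-- B is the idiomatic closed-form conversion format(ord(a), '08b'); A's fixed divide/mod loop is dropped.

-- ===== PORT A =====
-- core of A on the code point n = ord(a): the range(8) loop building div, then the
-- reverse-and-concatenate pass (int(x / 2) on a nonnegative int truncates = Int.tdiv)
def char_to_binary_core (n : Int) : String :=
  let st := (List.range 8).foldl
    (fun (st : Int × List Int) _ =>
      let temp := PySem.Int.mod st.1 2
      (Int.tdiv st.1 2, st.2 ++ [temp]))
    (n, [])
  st.2.reverse.foldl (fun result i => result ++ PySem.Int.toStr i) ""

def char_to_binary (a : String) : String :=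
  match a.toList with
  | [c] => char_to_binary_core (Int.ofNat c.toNat)   -- ord(a)
  | _ => ""   -- unreachable under Pre_: ord raises TypeError

-- ===== PORT B =====
-- core of B: format(n, '08b') = binary digits left-padded with '0' to width 8
def char_to_binary_alt_core (n : Nat) : String :=
  let s := Nat.toDigits 2 n
  String.ofList (List.replicate (8 - s.length) '0' ++ s)

def char_to_binary_alt (a : String) : String :=
  match a.toList with
  | c :: [] => char_to_binary_alt_core c.toNat
  | [] => ""
  | _ :: _ :: _ => ""

-- ===== PRECONDITION & SPEC =====
-- Pre_ excludes exactly the inputs where Python's ord(a) raises TypeError (len(a) ≠ 1)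
def Pre_char_to_binary (a : String) : Prop := a.toList.length = 1
instance (a : String) : Decidable (Pre_char_to_binary a) := by unfold Pre_char_to_binary; infer_instance
def pvWitness_char_to_binary : String := "A"

def Spec_char_to_binary (a : String) (out : String) : Prop := out = char_to_binary_alt a
instance (a : String) (out : String) : Decidable (Spec_char_to_binary a out) := by unfold Spec_char_to_binary; infer_instance

-- ===== CLAIM (what is proved, stated in full; the proofs are below) =====
def Claim_equal_char_to_binary : Prop := ∀ (a : String), Dom_char_to_binary a → Pre_char_to_binary a → Spec_char_to_binary a (char_to_binary a)

-- ===== LEMMAS AND PROOFS =====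
theorem core_eq : ∀ m : Fin 127, char_to_binary_core (Int.ofNat m.val) = char_to_binary_alt_core m.val := by
  decide

-- ===== VERDICT (by name: the statement is the Claim_ definition above) =====
theorem char_to_binary_spec : Claim_equal_char_to_binary := by
  intro a hdom hpre
  unfold Spec_char_to_binary
  unfold Pre_char_to_binary at hpre
  unfold Dom_char_to_binary pvDomStr at hdom
  match hc : a.toList with
  | [c] =>
    rw [hc] at hdom
    simp [List.all, pvDomChar] at hdom
    have hlt : c.toNat < 127 := by omega
    have := core_eq ⟨c.toNat, hlt⟩
    simp only [char_to_binary, char_to_binary_alt, hc]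
    exact this
  | [] => rw [hc] at hpre; simp at hpre
  | c1 :: c2 :: rest => rw [hc] at hpre; simp at hpre
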